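/- GENERATED by mk_final_copies.py from the proof of the farm's unit `start_decoder.F4c` (farm:start_decoder.F4c.1: Lemmas.lean) as the
   re-elaboration sweep compiled it — do not edit. -/
import Asan.CheckWalk
import Vorbis.Spec.Reader
import Vorbis.Spec.Units.start_decoder_F4c

open X86 X86.User Asan Vorbis Vorbis.Spec Vorbis.Spec.StartDecoder

set_option maxRecDepth 4000
set_option maxHeartbeats 4000000

namespace Vorbis.Spec.start_decoder_F4c

/-- **The return of `get_bits(f, 8)` on the arm with subclasses** (`cut212` = 0x11556b, `mov r15d,eax`): a cut point INSIDE the unit,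
between its two lemmas: the facts of `ClassMid` with `class_subclasses[j]` stored (`1 ≤ · ≤ 3`) and eax = the eight bits. -/
structure F4cMid (u₀ : State) (g : Ghost) (i : Nat) (A5 : Arena) (A : Arena × List Obj) (mc : Int) (j : Nat) (v : State) :
    Prop where
  /-- the segment's common part at `cut212` -/
  in4 : In4 u₀ g i A5 A mc Vorbis.L.start_decoder.cut212 v
  /-- r12d = j -/
  r12 : v.reg .r12 = addr j
  /-- r14 = (int64) j -/
  r14 : v.reg .r14 = addr j
  /-- `j ≤ max_class` -/
  j_le : (j : Int) ≤ mc
  /-- FL6 for every class below `j` -/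
  classes : ClassesUpTo v.mem (floorAt g v.mem i) (stb_vorbis.codebook_count v.mem g.f) j
  /-- `class_dimensions[j] ∈ [1, 8]` -/
  dim : 1 ≤ Floor1.class_dimensions v.mem (floorAt g v.mem i) j ∧ Floor1.class_dimensions v.mem (floorAt g v.mem i) j ≤ 8
  /-- `class_subclasses[j] ∈ [1, 3]` (store 0x1154df, `jne` 0x1154e7 taken) -/
  sub : 1 ≤ Floor1.class_subclasses v.mem (floorAt g v.mem i) j ∧ Floor1.class_subclasses v.mem (floorAt g v.mem i) j ≤ 3
  /-- the result of `get_bits(f, 8)` (the full register) -/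
  rax : (v.reg .rax).toNat < 256

/-- The byte stored by `mov r15d,eax ; mov [..],r15b` for a reader's result below 256: the result itself. -/
theorem f4c_byte (z : Word) (hz : z.toNat < 256) : (BitVec.setWidth 8 (Word.part .w32 z)).toNat = z.toNat := by
  rw [BitVec.toNat_setWidth, Vorbis.toNat_part32]
  omega

/-- **0x1154d2 → the book head with `k = 0` (no subclasses) or the return of `get_bits(f, 8)`.** The checked byte store
`class_subclasses[j] = eax` (`Floor.site`, offset `31H + j`), `test r15b,r15b ; jne`. Zero: `mov r14d,[rsp+24H]` (Z24 = 0, the fact `hz24`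
names it before the walk): `AtBookHead … j 0` by `Floor.carry_quiet` (no reader was called), `Floor.floor4_carry`, `Floor.classes_row`;
`ClassCur`: `dim` carried (`Floor.elem_below`), `sub = 0`, no masterbook needed, `BooksUpTo.zero`. Non-zero: the call, and `F4cMid` at
its return by `Floor.carry` with the part `[31H + j, 32H + j)` of the element; the stored byte read through the callee's footprint. -/
theorem f4c_head {Lay : Layout} (hLay : Lay.hi = 0x1000000) {μ : Microarch} (hμ : UserX.MicroOK μ) {u₀ : State}
    (hcode : HasCodeNat Lay u₀ Vorbis.L.start_decoder.entry Vorbis.Code.code_start_decoder.nat Vorbis.L.start_decoder.size)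
    (hgb : ∀ (others : List Obj) (frames : List (Nat × FrameLayout)) (Blk : Block → Prop) (len : Nat),
      Calls Lay μ Vorbis.WayInv (Vorbis.conv u₀) Vorbis.L.get_bits.entry (Vorbis.Spec.get_bits.spec others frames Blk len))
    (hst1 : Asan.SmallCheck Lay μ Vorbis.WayInv (Vorbis.CodeOK u₀) [.rax, .rdx] 1 Vorbis.L.__asan_store1_noabort.entry)
    {g : Ghost} {i : Nat} {A5 : Arena} {A : Arena × List Obj} {mc : Int} {j : Nat} {v : State}
    (hat : ClassMid u₀ g i A5 A mc j v) :
    ReachVia Lay μ WayInv v (fun w => AtBookHead u₀ g i A5 A mc j 0 w ∨ F4cMid u₀ g i A5 A mc j w) := by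
  have hloop := hat.in4.loop
  have hlt := hat.in4.cur.lt
  have hfr := hloop.frame
  have he := hfr.entry
  v_entry he
  simp only [depth] at he_room he_stack
  have hgb' := hgb A.2 g.frames' (g.Blk A) g.len
  have hgeo := Floor.geo hloop hlt
  obtain ⟨r8, rlo, rhi, ra, flo, fhi, fstack, farena, flog, fc1, fc64, ilt, gdef, blo, bhi, btext, bstack, bdata, blog⟩ := hgeo
  have hmc2 := hat.in4.cur.mc_hi
  have hj := hat.j_le
  have hj31 : j < 2 ^ 31 := by omega
  obtain ⟨R, hR⟩ : ∃ R, R = g.R := ⟨_, rfl⟩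
  obtain ⟨f, hfe⟩ : ∃ f, f = g.f := ⟨_, rfl⟩
  obtain ⟨gi, hgi⟩ : ∃ gi, gi = floorAt g v.mem i := ⟨_, rfl⟩
  obtain ⟨z, hz⟩ : ∃ z, v.reg .rax = z := ⟨_, rfl⟩
  have hz4 : z.toNat < 4 := by
    rw [← hz]
    exact hat.rax
  have w_rip := hfr.rip
  have c_rsp := hfr.rsp
  have c_rbp := hloop.rbp
  have c_rbx := hat.in4.rbx
  have c_r12 : v.reg .r12 = UInt64.ofNat j := hat.r12
  have c_r14 : v.reg .r14 = UInt64.ofNat j := hat.r14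
  have c_rax := hz
  rw [← hR] at c_rsp r8 rlo rhi ra fstack
  rw [← hfe] at c_rbp flo fhi fstack farena flog
  rw [← hgi] at c_rbx gdef
  simp only [addr] at c_rsp c_rbp c_rbx
  -- the literal-0 slot Z24 (`[rsp + 24H]`), loaded at 0x1154e9
  have hz24 : v.mem.readLE (UInt64.ofNat R + 36) 4 = 0 := by
    have h := hloop.mid.consts.z24 (by omega) (by omega)
    unfold Mem.u32 at h
    rw [← hR] at h
    have ea : (UInt64.ofNat R + 36 : Word).toNat = R + 0x24 := by
      u_omega
    rw [← eq_addr _ _ ea] at h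
    exact h
  have w_eq : Mem.EqOn Vorbis.L.textLo Vorbis.L.textHi u₀.mem v.mem := hfr.code
  have hdf : v.flags .df = false := (show abiInv _ from hfr.inv).1
  have hmx : v.mxcsr &&& 0x1F80 = 0x1F80 := (show abiInv _ from hfr.inv).2
  have hsse := Vorbis.sseOK_of_abiInv hfr.inv
  -- THE TWO ADDRESSES THAT ARE READ THROUGH A STORE OF THE OTHER BASE, AS NUMBERS, BEFORE THE WALK: `mov r14d,[rsp+24H]` (0x1154e9) is read through
  -- the byte store at `gi + j + 31H`, and that byte is read back (`u_resolve`, `hd0`) through the return address pushed at `R - 8`. Either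
  -- disjointness is a disjunction that needs the case split `bstack` (the element is below or above the stack) over `toNat`s with `% 2 ^ 64`:
  -- `omega` gives up on it (the read stays in `w_r14`, and `rfl` evaluates it for minutes). With the two equations in the context the side tactic
  -- sees `R + 36` and `gi + 49 + j`.
  have hea49 : (UInt64.ofNat gi + UInt64.ofNat j + 49 : Word).toNat = gi + 49 + j := by
    u_omega
  have hea36 : (UInt64.ofNat R + 36 : Word).toNat = R + 36 := by
    u_omega
  u_walk hcode [hμ.vendor] until [Vorbis.L.start_decoder.loop20, Vorbis.L.start_decoder.cut212] span [Vorbis.L.textLo, Vorbis.L.textHi] side (v_side)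
  case check_1154da =>
    have hun : ShadowUntouched v.mem s_1154da.mem := by v_untouched
    have hs := Floor.site hloop hlt (0x31 + j) 1 (Nat.le_refl _) (by simp only [Off.sizeof.Floor]; omega)
    refine Vorbis.Spec.check_site hfr.shadow hun hs ?_
    rw [← hgi]
    u_omega
  case call_inv => v_inv
  case pre_115566 =>
    have hun : ShadowUntouched v.mem s_115566.mem := by v_untouched
    have hrdi : (s_115566.reg .rdi).toNat = g.f := by
      rw [w_rdi, hfe]
      exact toNat_addr g.f (by omega)
    have hq : ∀ w, w ∈ [(⟨R - 8, R⟩ : Span), ⟨gi + 0x31 + j, gi + 0x32 + j⟩] →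
        Floor.Quiet g (floorAt g v.mem i) (0x31 + j) (0x32 + j) w := by
      intro w hw
      simp only [List.mem_cons, List.mem_nil_iff, or_false] at hw
      unfold Floor.Quiet
      rcases hw with rfl | rfl
      all_goals simp only []
      all_goals omega
    have hsm : Mem.SameExcept [(⟨R - 8, R⟩ : Span), ⟨gi + 0x31 + j, gi + 0x32 + j⟩] v.mem s_115566.mem := by
      u_same
    refine ⟨Floor.reader_pre hloop ?_ hun hrdi ?_, ?_⟩
    · rw [w_rsp, ← hR]
      u_omega
    · exact Floor.bits_quiet (Floor.geo hloop hlt) hloop.mid.bits hsm hq (by omega)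
    · rw [bitsArg_def, w_rsi]
      decide
  · -- the return of get_bits(f, 8): the cut point 0x11556b
    rw [f4c_byte z (by omega)] at hbr_1154e7
    have hrdi : (s_115566.reg .rdi).toNat = f := by
      rw [w_rdi_115566]
      exact toNat_addr f (by omega)
    obtain ⟨hpu, hpb⟩ := w_post
    rw [hrdi] at hpb
    v_after_call w_rsp_115566 w_mem_115566
    simp only [w_rdi_115566] at w_same
    have hun0 : ShadowUntouched v.mem s_115566.mem := by
      rw [w_mem_115566]
      v_untouched
    have hun : ShadowUntouched v.mem s_115566r.mem := Mem.EqOn.trans hun0 hpu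
    have eb := f4c_byte z (by omega)
    have hd0 : s_115566.mem.readLE (UInt64.ofNat gi + UInt64.ofNat j + 49) 1 = z.toNat := by
      rw [← eb]
      u_resolve
      rw [eb]
      omega
    rw [w_mem_115566] at hd0
    have hd1 : s_115566r.mem.readLE (UInt64.ofNat gi + UInt64.ofNat j + 49) 1 = z.toNat := by
      have ea : (UInt64.ofNat gi + UInt64.ofNat j + 49 : Word).toNat = gi + 49 + j := by
        u_omega
      have t1 : (UInt64.ofNat R - 8 : Word).toNat = R - 8 := by
        u_omega
      have t2 : (UInt64.ofNat f : Word).toNat = f := by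
        u_omega
      rw [← hd0]
      apply w_same.readLE _ 1 (by rw [ea]; omega)
      intro w hw
      simp only [List.mem_cons, List.mem_nil_iff, or_false] at hw
      rcases hw with rfl | rfl | rfl | rfl | rfl | rfl
      all_goals simp only [ea, t1, t2]
      all_goals omega
    have hsame : Mem.SameExcept [⟨R - 408, R⟩, ⟨f + 48, f + 56⟩, ⟨f + 84, f + 96⟩, ⟨f + 136, f + 144⟩,
        ⟨f + 1484, f + 1749⟩, ⟨f + 1752, f + 1784⟩, ⟨gi + 0x31 + j, gi + 0x32 + j⟩] v.mem s_115566r.mem := by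
      u_same
    rw [hR, hfe, hgi] at hsame
    have hws : ∀ w, w ∈ [(⟨g.R - 408, g.R⟩ : Span), ⟨g.f + 48, g.f + 56⟩, ⟨g.f + 84, g.f + 96⟩, ⟨g.f + 136, g.f + 144⟩,
        ⟨g.f + 1484, g.f + 1749⟩, ⟨g.f + 1752, g.f + 1784⟩,
        ⟨floorAt g v.mem i + 0x31 + j, floorAt g v.mem i + 0x32 + j⟩] →
        Floor.Win g (floorAt g v.mem i) (0x31 + j) (0x32 + j) w := by
      intro w hw
      simp only [List.mem_cons, List.mem_nil_iff, or_false] at hw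
      unfold Floor.Win
      rcases hw with rfl | rfl | rfl | rfl | rfl | rfl | rfl
      all_goals simp only []
      all_goals omega
    have earg : bitsArg s_115566 = 8 := by
      rw [bitsArg_def, w_rsi_115566]
      rfl
    have e1 : s_115566r.reg .rsp = addr g.R := by
      rw [w_rsp, hR]
      rfl
    have e2 : s_115566r.reg .rbp = addr g.f := by
      rw [w_kept .rbp rfl, c_rbp, hfe]
      rfl
    have hbits' : Bits (g.Blk A) g.len s_115566r.mem g.f := by
      rw [← hfe]
      exact hpb.bits
    have hloop' := Floor.carry hloop hlt (by omega) w_rip e1 e2 w_inv w_eq hsame hws hun hbits'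
    have hgeo := Floor.geo hloop hlt
    obtain ⟨eG, _, ecc, _⟩ := Floor.fields_same hgeo hsame hws (by omega)
    have hcur' := Floor.floor4_carry hgeo hat.in4.cur (by omega) (by omega) (by omega) hsame hws
    have hcl' := Floor.classes_row hgeo hat.classes (by omega) (Or.inr (Or.inl ⟨Nat.le_refl _, by omega⟩)) (by omega) (by omega)
      hsame (fun w hw => (hws w hw).winT)
    have EG := Floor.elem_below hgeo hsame (fun w hw => (hws w hw).winT (i := i)) (by omega) (by omega)
    rw [← hgi] at EG
    have ed : Floor1.class_dimensions s_115566r.mem gi j = Floor1.class_dimensions v.mem gi j := by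
      simp only [vacc, voff]
      exact EG.u8 _ (by omega) (by omega) (by omega)
    have es : Floor1.class_subclasses s_115566r.mem gi j = z.toNat := by
      simp only [vacc, voff]
      have ea : (UInt64.ofNat gi + UInt64.ofNat j + 49 : Word).toNat = gi + 49 + j := by
        u_omega
      unfold Mem.u8
      rw [← eq_addr _ _ ea]
      exact hd1
    have hdim := hat.dim
    rw [← hgi] at hdim
    refine ReachVia.done (Or.inr ⟨⟨hloop', ?_, ?_, hcur'⟩, ?_, ?_, hj, ?_, ?_, ?_, ?_⟩)
    · rw [eG, w_kept .rbx rfl]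
      exact hat.in4.rbx
    · rw [w_kept .r13 rfl]
      exact hat.in4.r13
    · rw [w_kept .r12 rfl]
      exact hat.r12
    · rw [w_kept .r14 rfl]
      exact hat.r14
    · rw [eG, ecc]
      exact hcl'
    · rw [eG, ← hgi, ed]
      exact hdim
    · rw [eG, ← hgi, es]
      omega
    · have h2 := hpb.result.2 (by rw [earg]; decide)
      rw [earg] at h2
      exact h2
  · -- no subclasses: 0x1154e9 `mov r14d,[rsp+24H]`, the book head with `k = 0`
    rw [f4c_byte z (by omega)] at hbr_1154e7
    have hun : ShadowUntouched v.mem s_1154e9.mem := by v_untouched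
    have eb := f4c_byte z (by omega)
    have hd1 : s_1154e9.mem.readLE (UInt64.ofNat gi + UInt64.ofNat j + 49) 1 = z.toNat := by
      rw [← eb]
      u_resolve
      rw [eb]
      omega
    have hsame : Mem.SameExcept [⟨R - 408, R⟩, ⟨gi + 0x31 + j, gi + 0x32 + j⟩] v.mem s_1154e9.mem := by
      u_same
    rw [hR, hgi] at hsame
    have hq : ∀ w, w ∈ [(⟨g.R - 408, g.R⟩ : Span), ⟨floorAt g v.mem i + 0x31 + j, floorAt g v.mem i + 0x32 + j⟩] →
        Floor.Quiet g (floorAt g v.mem i) (0x31 + j) (0x32 + j) w := by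
      intro w hw
      simp only [List.mem_cons, List.mem_nil_iff, or_false] at hw
      unfold Floor.Quiet
      rcases hw with rfl | rfl
      all_goals simp only []
      all_goals omega
    have hws := fun w hw => (hq w hw).win
    have hinv : abiInv s_1154e9 := by
      refine ⟨?_, ?_⟩
      · rw [w_flags]
        simp only [X86.User.df_setStatus]
        exact w_df_1154da
      · rw [w_mxcsr]
        exact hmx
    have e1 : s_1154e9.reg .rsp = addr g.R := by
      rw [w_rsp, hR]
      rfl
    have e2 : s_1154e9.reg .rbp = addr g.f := by
      rw [w_kept .rbp rfl, c_rbp, hfe]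
      rfl
    have hloop' := Floor.carry_quiet hloop hlt (by omega) w_rip e1 e2 hinv w_eq hsame hq hun
    have hgeo := Floor.geo hloop hlt
    obtain ⟨eG, _, ecc, _⟩ := Floor.fields_same hgeo hsame hws (by omega)
    have hcur' := Floor.floor4_carry hgeo hat.in4.cur (by omega) (by omega) (by omega) hsame hws
    have hcl' := Floor.classes_row hgeo hat.classes (by omega) (Or.inr (Or.inl ⟨Nat.le_refl _, by omega⟩)) (by omega) (by omega)
      hsame (fun w hw => (hws w hw).winT)
    have EG := Floor.elem_below hgeo hsame (fun w hw => (hws w hw).winT (i := i)) (by omega) (by omega)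
    rw [← hgi] at EG
    have ed : Floor1.class_dimensions s_1154e9.mem gi j = Floor1.class_dimensions v.mem gi j := by
      simp only [vacc, voff]
      exact EG.u8 _ (by omega) (by omega) (by omega)
    have es : Floor1.class_subclasses s_1154e9.mem gi j = 0 := by
      simp only [vacc, voff]
      have ea : (UInt64.ofNat gi + UInt64.ofNat j + 49 : Word).toNat = gi + 49 + j := by
        u_omega
      unfold Mem.u8
      rw [← eq_addr _ _ ea, hd1]
      exact hbr_1154e7
    have hdim := hat.dim
    rw [← hgi] at hdim
    refine ReachVia.done (Or.inl ⟨⟨hloop', ?_, ?_, hcur'⟩, ?_, ?_, hj, ?_, ?_⟩)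
    · rw [eG, w_kept .rbx rfl]
      exact hat.in4.rbx
    · rw [w_kept .r13 rfl]
      exact hat.in4.r13
    · rw [w_kept .r12 rfl]
      exact hat.r12
    · rw [w_r14]
      rfl
    · rw [eG, ecc]
      exact hcl'
    · rw [eG, ecc, ← hgi]
      refine ⟨?_, ?_, ?_, BooksUpTo.zero _ _ _ _, Nat.zero_le _⟩
      · rw [ed]
        exact hdim
      · rw [es]
        omega
      · intro hne
        exact absurd es hne

end Vorbis.Spec.start_decoder_F4c
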